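-- pv_equiv track=rewrite | github.com/Mr6one/EQuant | equant/qconfig.py | _has_parent_in_config
-- ===== SOURCE A (Python) =====
-- from typing import Dict, List, Set, Tuple, Union, Any
--
-- def _has_parent_in_config(module_name: str, config: Set[str]) -> bool:
--     if len(module_name) == 0:
--         return False
--     if module_name in config:
--         return True
--     else:
--         *parent, _ = module_name.rsplit('.', 1)
--         parent = parent[0] if parent else ''
--         return _has_parent_in_config(parent, config)
-- ===== SOURCE B (Python) =====
-- def _has_parent_in_config(module_name, config):
--     dots = [i for i, ch in enumerate(module_name) if ch == '.']
--     candidates = [module_name[:i] for i in dots] + [module_name]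
--     return any(c in config for c in candidates if c)
-- ===== Notes on version B (the rewrite author's own statement) =====
-- stated objective: idiomatic
-- what changed: A's rsplit('.',1) tail recursion over successive parents is replaced by one enumerate pass that collects every dotted-prefix candidate plus the full name and a single any() membership test.
import Mathlib
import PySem

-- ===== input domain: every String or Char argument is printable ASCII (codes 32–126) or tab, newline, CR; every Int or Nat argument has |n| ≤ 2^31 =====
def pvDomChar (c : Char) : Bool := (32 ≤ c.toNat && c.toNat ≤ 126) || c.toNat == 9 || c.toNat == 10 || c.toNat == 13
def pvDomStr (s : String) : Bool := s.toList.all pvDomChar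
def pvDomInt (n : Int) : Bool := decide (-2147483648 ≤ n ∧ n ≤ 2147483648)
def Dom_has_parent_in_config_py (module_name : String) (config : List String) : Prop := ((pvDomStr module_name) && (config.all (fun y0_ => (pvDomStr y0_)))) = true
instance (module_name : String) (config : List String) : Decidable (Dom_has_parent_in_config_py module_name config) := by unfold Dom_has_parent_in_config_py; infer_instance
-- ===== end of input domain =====

-- B replaces A's rsplit tail recursion by one comprehension collecting every dotted
-- prefix plus the full name and a single any() membership pass (objective: idiomatic).

-- ===== PORT A =====
-- the indices of '.' in cs (shared helper; positions scanned left to right)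
def pvDots (cs : List Char) : List Nat :=
  (List.range cs.length).filter (fun i => cs.getD i ' ' = '.')

-- hand port of `*parent, _ = module_name.rsplit('.', 1); parent = parent[0] if parent else ''`:
-- exact — rsplit('.', 1) cuts at the LAST '.', so parent is the text before the last dot, '' if no dot
def pvParent (cs : List Char) : List Char :=
  match (pvDots cs).getLast? with
  | none => []
  | some i => cs.take i

lemma pvParent_length_lt (cs : List Char) (h : cs.length ≠ 0) :
    (pvParent cs).length < cs.length := by
  unfold pvParent
  cases hl : (pvDots cs).getLast? with
  | none => simpa using Nat.pos_of_ne_zero h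
  | some i =>
      have hm : i ∈ pvDots cs := List.mem_of_getLast? hl
      have hi : i < cs.length := by
        have := (List.mem_filter.mp hm).1
        simpa using this
      simp only [List.length_take]
      omega

-- literal port of A's recursion: empty → False; name in config → True; else recurse on parent
def pvHasParentA (config : List String) (cs : List Char) : Bool :=
  if h : cs.length = 0 then false
  else if config.contains (String.ofList cs) then true
  else pvHasParentA config (pvParent cs)
termination_by cs.length
decreasing_by exact pvParent_length_lt cs h

def has_parent_in_config_py (module_name : String) (config : List String) : Bool :=
  pvHasParentA config module_name.toList

-- ===== PORT B =====
-- literal port of Source B: dots = [i for i,ch in enumerate(name) if ch=='.'];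
-- candidates = [name[:i] for i in dots] + [name]; any(c in config for c in candidates if c)
def pvCandidates (cs : List Char) : List (List Char) :=
  (pvDots cs).map (fun i => cs.take i) ++ [cs]

def has_parent_in_config_py_alt (module_name : String) (config : List String) : Bool :=
  (pvCandidates module_name.toList).any
    (fun c => decide (c ≠ []) && config.contains (String.ofList c))

-- ===== PRECONDITION & SPEC =====
def Spec_has_parent_in_config_py (module_name : String) (config : List String) (out : Bool) : Prop := out = has_parent_in_config_py_alt module_name config
instance (module_name : String) (config : List String) (out : Bool) : Decidable (Spec_has_parent_in_config_py module_name config out) := by unfold Spec_has_parent_in_config_py; infer_instance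

-- ===== CLAIM (what is proved, stated in full; the proofs are below) =====
def Claim_equal_has_parent_in_config_py : Prop := ∀ (module_name : String) (config : List String), Dom_has_parent_in_config_py module_name config → Spec_has_parent_in_config_py module_name config (has_parent_in_config_py module_name config)

-- ===== LEMMAS AND PROOFS =====

lemma mem_pvDots {cs : List Char} {j : Nat} :
    j ∈ pvDots cs ↔ j < cs.length ∧ cs.getD j ' ' = '.' := by
  simp [pvDots, List.mem_filter]

lemma getD_take {cs : List Char} {i j : Nat} (h : j < i) :
    (cs.take i).getD j ' ' = cs.getD j ' ' := by
  simp [List.getD, h]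

lemma mem_pvDots_take {cs : List Char} {i j : Nat} (hi : i ≤ cs.length) :
    j ∈ pvDots (cs.take i) ↔ j < i ∧ cs.getD j ' ' = '.' := by
  constructor
  · intro h
    have h' := mem_pvDots.mp h
    have hj : j < i := by
      have := h'.1; simpa [List.length_take, Nat.min_eq_left hi] using this
    exact ⟨hj, by rw [← getD_take hj]; exact h'.2⟩
  · intro ⟨hj, hd⟩
    exact mem_pvDots.mpr ⟨by simpa [List.length_take, Nat.min_eq_left hi] using hj,
      by rw [getD_take hj]; exact hd⟩

lemma pvDots_le_last {cs : List Char} {i : Nat} (h : (pvDots cs).getLast? = some i) :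
    ∀ j ∈ pvDots cs, j ≤ i := by
  intro j hj
  have hsplit : (pvDots cs).dropLast ++ [i] = pvDots cs :=
    List.dropLast_append_getLast? (a := i) (Option.mem_def.mpr h)
  have hpw : (pvDots cs).Pairwise (· < ·) :=
    List.Pairwise.sublist (List.filter_sublist) List.pairwise_lt_range
  rw [← hsplit] at hj hpw
  rcases List.mem_append.mp hj with hjd | hji
  · have := (List.pairwise_append.mp hpw).2.2 j hjd i (by simp)
    omega
  · simp at hji; omega

-- B's value as a function of the char list
def pvB (config : List String) (cs : List Char) : Bool :=
  (pvCandidates cs).any (fun c => decide (c ≠ []) && config.contains (String.ofList c))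

lemma pvB_step_none (config : List String) (cs : List Char)
    (h : (pvDots cs).getLast? = none) :
    pvB config cs = (decide (cs ≠ []) && config.contains (String.ofList cs)) := by
  have : pvDots cs = [] := List.getLast?_eq_none_iff.mp h
  simp [pvB, pvCandidates, this]

lemma pvB_step_some (config : List String) (cs : List Char) {i : Nat}
    (h : (pvDots cs).getLast? = some i) :
    pvB config cs = (config.contains (String.ofList cs) || pvB config (cs.take i)) := by
  have hmem : i ∈ pvDots cs := List.mem_of_getLast? h
  have hi : i < cs.length := (mem_pvDots.mp hmem).1
  have hcs : cs ≠ [] := by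
    intro hnil; rw [hnil] at hi; simp at hi
  rw [Bool.eq_iff_iff, Bool.or_eq_true]
  constructor
  · intro hL
    rcases List.any_eq_true.mp hL with ⟨c, hc, hcf⟩
    rcases List.mem_append.mp hc with hc | hc
    · rcases List.mem_map.mp hc with ⟨j, hj, rfl⟩
      have hjd := mem_pvDots.mp hj
      have hjle : j ≤ i := pvDots_le_last h j hj
      rcases Nat.lt_or_ge j i with hji | hji
      · refine Or.inr (List.any_eq_true.mpr ⟨cs.take j, ?_, hcf⟩)
        refine List.mem_append.mpr (Or.inl (List.mem_map.mpr ⟨j, ?_, ?_⟩))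
        · exact (mem_pvDots_take (Nat.le_of_lt hi)).mpr ⟨hji, hjd.2⟩
        · rw [List.take_take, Nat.min_eq_left (Nat.le_of_lt hji)]
      · have hji' : j = i := Nat.le_antisymm hjle hji
        subst hji'
        exact Or.inr (List.any_eq_true.mpr ⟨cs.take j,
          List.mem_append.mpr (Or.inr (by simp)), hcf⟩)
    · have hcc : c = cs := by simpa using hc
      subst hcc
      exact Or.inl ((Bool.and_eq_true _ _).mp hcf).2
  · intro hR
    rcases hR with hcc | hB
    · exact List.any_eq_true.mpr ⟨cs, List.mem_append.mpr (Or.inr (by simp)),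
        (Bool.and_eq_true _ _).mpr ⟨decide_eq_true hcs, hcc⟩⟩
    · rcases List.any_eq_true.mp hB with ⟨c, hc, hcf⟩
      rcases List.mem_append.mp hc with hc | hc
      · rcases List.mem_map.mp hc with ⟨j, hj, rfl⟩
        have hji := (mem_pvDots_take (Nat.le_of_lt hi)).mp hj
        refine List.any_eq_true.mpr ⟨(cs.take i).take j, ?_, hcf⟩
        refine List.mem_append.mpr (Or.inl (List.mem_map.mpr ⟨j, ?_, ?_⟩))
        · exact mem_pvDots.mpr ⟨Nat.lt_trans hji.1 hi, hji.2⟩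
        · rw [List.take_take, Nat.min_eq_left (Nat.le_of_lt hji.1)]
      · have hcc : c = cs.take i := by simpa using hc
        subst hcc
        exact List.any_eq_true.mpr ⟨cs.take i,
          List.mem_append.mpr (Or.inl (List.mem_map.mpr ⟨i, hmem, rfl⟩)), hcf⟩

lemma pvA_eq_pvB (config : List String) : ∀ n cs, cs.length ≤ n →
    pvHasParentA config cs = pvB config cs := by
  intro n
  induction n with
  | zero =>
      intro cs hcs
      have : cs = [] := List.eq_nil_of_length_eq_zero (Nat.le_zero.mp hcs)
      subst this
      rw [pvHasParentA]
      simp [pvB, pvCandidates, pvDots]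
  | succ n ih =>
      intro cs hcs
      rw [pvHasParentA]
      by_cases h0 : cs.length = 0
      · have : cs = [] := List.eq_nil_of_length_eq_zero h0
        subst this
        simp [pvB, pvCandidates, pvDots]
      · simp only [h0, dite_false]
        have hcs' : cs ≠ [] := by
          intro hx; rw [hx] at h0; exact h0 rfl
        cases hl : (pvDots cs).getLast? with
        | none =>
            rw [pvB_step_none config cs hl]
            have hp : pvParent cs = [] := by unfold pvParent; rw [hl]
            rw [hp, pvHasParentA]
            by_cases hcc : config.contains (String.ofList cs) = true
            · simp [hcs']
            · simp only [Bool.not_eq_true] at hcc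
              simp [hcs']
        | some i =>
            rw [pvB_step_some config cs hl]
            have hp : pvParent cs = cs.take i := by unfold pvParent; rw [hl]
            have hi : i < cs.length := (mem_pvDots.mp (List.mem_of_getLast? hl)).1
            have hlen : (cs.take i).length ≤ n := by
              simp only [List.length_take]; omega
            rw [hp]
            by_cases hcc : config.contains (String.ofList cs) = true
            · rw [if_pos hcc, hcc, Bool.true_or]
            · rw [if_neg hcc, Bool.eq_false_iff.mpr hcc, Bool.false_or]
              exact ih (cs.take i) hlen

-- ===== VERDICT (by name: the statement is the Claim_ definition above) =====
theorem has_parent_in_config_py_spec : Claim_equal_has_parent_in_config_py := by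
  intro module_name config _
  show has_parent_in_config_py module_name config = has_parent_in_config_py_alt module_name config
  exact pvA_eq_pvB config module_name.toList.length module_name.toList (le_refl _)
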